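-- pv_equiv track=rewrite | github.com/abdreams/CompetitiveProgramming | G_Shuffling_Songs.py | slv
-- ===== SOURCE A (Python) =====
-- def slv(dp, pairs, mask, idx, n):
--     if mask == 0:
--         return 0
--     if idx != -1 and dp[idx][mask] != -1:
--         return dp[idx][mask]
--
--     first_a, first_b = -1, -1
--     if idx != -1:
--         first_a = pairs[idx][0]
--         first_b = pairs[idx][1]
--
--     mxpr = 0
--     for i in range(n):
--         if mask & (1 << i):
--             if idx == -1 or (pairs[i][0] == first_a or pairs[i][1] == first_b):
--                 mxpr = max(mxpr, 1 + slv(dp, pairs, (mask ^ (1 << i)), i, n))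
--
--     if idx == -1:
--         return mxpr
--     dp[idx][mask] = mxpr
--     return mxpr
-- ===== SOURCE B (Python) =====
-- def slv(dp, pairs, mask, idx, n):
--     # Bottom-up tabulation: g[m][i] = longest continuable chain after placing
--     # song i with m as the remaining set (honouring the supplied memo table dp
--     # as an override, exactly as the top-down version consults it).
--     if mask == 0:
--         return 0
--     if idx != -1 and dp[idx][mask] != -1:
--         return dp[idx][mask]          # the queried state is already memoized in dp: honour the override
--     g = [[0] * n]
--     for m in range(1, mask + 1):
--         row = []
--         for i in range(n):
--             if dp[i][m] != -1:
--                 row.append(dp[i][m])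
--             else:
--                 a, b = pairs[i]
--                 best = 0
--                 for j in range(n):
--                     if m >> j & 1 == 1 and (pairs[j][0] == a or pairs[j][1] == b):
--                         v = 1 + g[m ^ (1 << j)][j]
--                         if v > best:
--                             best = v
--                 row.append(best)
--         g.append(row)
--     if idx != -1:
--         return g[mask][idx]
--     best = 0
--     for j in range(n):
--         if mask >> j & 1 == 1:
--             v = 1 + g[mask ^ (1 << j)][j]
--             if v > best:
--                 best = v
--     return best
-- ===== Notes on version B (the rewrite author's own statement) =====
-- stated objective: alternative
-- what changed: Replaces the top-down memoized recursion that mutates the passed-in dp table with a bottom-up tabulation: after honouring a memo override for the queried state itself, a table g[m][i] is filled for every mask m from 1 to mask in increasing order (each state only needs strictly smaller masks), still honouring non-(-1) entries of dp as overrides; B never mutates dp (A writes its memo into dp; return values agree).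
-- outside the precondition, e.g. on slv([[5, 6]], [(0, 0)], -1, -1, 1): A returns 6, B raises IndexError; on slv([[-1, -1], [-1, -1]], [(1, 1), (1, 2)], 1, -2, 2): A returns 1, B returns 1
import Mathlib
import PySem

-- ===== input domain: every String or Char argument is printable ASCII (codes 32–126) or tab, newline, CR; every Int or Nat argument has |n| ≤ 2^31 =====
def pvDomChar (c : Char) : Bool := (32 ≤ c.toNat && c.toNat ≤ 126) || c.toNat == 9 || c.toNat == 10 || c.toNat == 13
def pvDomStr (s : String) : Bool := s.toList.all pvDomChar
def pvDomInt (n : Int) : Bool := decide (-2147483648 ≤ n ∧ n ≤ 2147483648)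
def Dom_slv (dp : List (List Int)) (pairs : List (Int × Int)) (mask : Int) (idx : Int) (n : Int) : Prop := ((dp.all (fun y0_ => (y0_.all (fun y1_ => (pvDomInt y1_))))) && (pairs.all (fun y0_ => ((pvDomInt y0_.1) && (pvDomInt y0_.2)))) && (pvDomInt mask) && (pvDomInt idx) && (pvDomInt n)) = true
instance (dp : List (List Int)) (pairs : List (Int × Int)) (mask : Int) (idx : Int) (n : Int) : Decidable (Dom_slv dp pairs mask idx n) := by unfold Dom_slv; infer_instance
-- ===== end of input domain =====

-- B replaces A's top-down memoized recursion (which mutates the dp table it is given) by a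
-- bottom-up tabulation over masks in increasing order; equal return values are proved on Pre_.
-- A mutates dp in place (its memo writes), B does not: the equivalence is about the return value only.


-- ===== PORT A =====
-- shared small helpers for Python indexing/bit primitives (used by both ports):
-- pybit i = 1 << i, pyshr a k = a >> k (exact for the nonnegative shifts both programs perform)
def pybit (i : Int) : Int := (1:Int) <<< i.toNat

def pyshr (a : Int) (k : Nat) : Int := a >>> k

-- xss[i][j] (chained indexing); total stand-in, exact when both indices are in range (Pre_)
def get2 (xss : List (List Int)) (i j : Int) : Int :=
  PySem.List.pyGetD (PySem.List.pyGetD xss i []) j (-1)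

-- pairs[i]; exact when i is in range (Pre_)
def pget (pairs : List (Int × Int)) (i : Int) : Int × Int :=
  PySem.List.pyGetD pairs i (-1, -1)

-- dp[i][m] = v; exact when both indices are in range (Pre_)
def put2 (xss : List (List Int)) (i j v : Int) : List (List Int) :=
  PySem.List.pySetD xss i (PySem.List.pySetD (PySem.List.pyGetD xss i []) j v)

-- A's recursion, threading the mutated dp; the fuel only guards totality (the mask strictly
-- decreases at each recursive call, so fuel mask.toNat+1 is never exhausted under Pre_).
def slvGo (pairs : List (Int × Int)) (n : Int) : Nat → List (List Int) → Int → Int → Int × List (List Int)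
  | 0, dp, _, _ => (0, dp)
  | fuel+1, dp, mask, idx =>
    if mask = 0 then (0, dp)
    else if idx ≠ -1 ∧ get2 dp idx mask ≠ -1 then (get2 dp idx mask, dp)
    else
      let fa : Int := if idx ≠ -1 then (pget pairs idx).1 else -1
      let fb : Int := if idx ≠ -1 then (pget pairs idx).2 else -1
      let st := (PySem.List.pyRange 0 n 1).foldl (fun (s : Int × List (List Int)) i =>
          if PySem.Int.band mask (pybit i) ≠ 0 then
            if idx = -1 ∨ (pget pairs i).1 = fa ∨ (pget pairs i).2 = fb then
              let r := slvGo pairs n fuel s.2 (PySem.Int.bxor mask (pybit i)) i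
              (max s.1 (1 + r.1), r.2)
            else s
          else s) (0, dp)
      if idx = -1 then st
      else (st.1, put2 st.2 idx mask st.1)

def slv (dp : List (List Int)) (pairs : List (Int × Int)) (mask : Int) (idx : Int) (n : Int) : Int :=
  (slvGo pairs n (mask.toNat + 1) dp mask idx).1

-- ===== PORT B =====
def slvTab (dp : List (List Int)) (pairs : List (Int × Int)) (n mask : Int) : List (List Int) :=
  (PySem.List.pyRange 1 (mask + 1) 1).foldl (fun g m =>
    g ++ [(PySem.List.pyRange 0 n 1).foldl (fun row i =>
      if get2 dp i m ≠ -1 then row ++ [get2 dp i m]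
      else
        let a := (pget pairs i).1
        let b := (pget pairs i).2
        row ++ [(PySem.List.pyRange 0 n 1).foldl (fun best j =>
          if PySem.Int.band (pyshr m j.toNat) 1 = 1 ∧ ((pget pairs j).1 = a ∨ (pget pairs j).2 = b) then
            let v := 1 + get2 g (PySem.Int.bxor m (pybit j)) j
            if v > best then v else best
          else best) 0]) []])
    [List.replicate n.toNat 0]

def slv_alt (dp : List (List Int)) (pairs : List (Int × Int)) (mask : Int) (idx : Int) (n : Int) : Int :=
  if mask = 0 then 0
  else if idx ≠ -1 ∧ get2 dp idx mask ≠ -1 then get2 dp idx mask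
  else
    let g := slvTab dp pairs n mask
    if idx ≠ -1 then get2 g mask idx
    else (PySem.List.pyRange 0 n 1).foldl (fun best j =>
      if PySem.Int.band (pyshr mask j.toNat) 1 = 1 then
        let v := 1 + get2 g (PySem.Int.bxor mask (pybit j)) j
        if v > best then v else best
      else best) 0

-- ===== PRECONDITION & SPEC =====
-- Pre_ admits: mask 0; a memoized query state (any dp shape Python indexes successfully, wraparound
-- included); the empty problem (no songs, no chosen index); and the well-formed memo-table domain.
-- It excludes inputs on which the Python A raises (out-of-range reads of dp/pairs) and inputs where
-- negative-index wraparound makes A's DEEPER memo reads accidental; on some of the latter A still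
-- returns a value (see the cites in the claim).
def Pre_slv (dp : List (List Int)) (pairs : List (Int × Int)) (mask : Int) (idx : Int) (n : Int) : Prop :=
  mask = 0 ∨
  (idx ≠ -1 ∧ PySem.Raise.InRange dp.length idx ∧
   PySem.Raise.InRange (PySem.List.pyGetD dp idx []).length mask ∧ get2 dp idx mask ≠ -1) ∨
  (mask < 0 ∧ idx = -1 ∧ n ≤ 0) ∨
  (0 ≤ n ∧ n ≤ (pairs.length : Int) ∧ n ≤ (dp.length : Int) ∧ 0 < mask ∧
   (idx = -1 ∨ (0 ≤ idx ∧ idx < n)) ∧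
   ∀ row ∈ dp.take n.toNat, mask < (row.length : Int))
instance (dp : List (List Int)) (pairs : List (Int × Int)) (mask : Int) (idx : Int) (n : Int) : Decidable (Pre_slv dp pairs mask idx n) := by unfold Pre_slv; infer_instance

def pvWitness_slv : List (List Int) × (List (Int × Int)) × Int × Int × Int :=
  ([[-1, -1]], [(1, 2)], 1, -1, 1)

def Spec_slv (dp : List (List Int)) (pairs : List (Int × Int)) (mask : Int) (idx : Int) (n : Int) (out : Int) : Prop := out = slv_alt dp pairs mask idx n
instance (dp : List (List Int)) (pairs : List (Int × Int)) (mask : Int) (idx : Int) (n : Int) (out : Int) : Decidable (Spec_slv dp pairs mask idx n out) := by unfold Spec_slv; infer_instance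

-- ===== CLAIM (what is proved, stated in full; the proofs are below) =====
def Claim_equal_slv : Prop := ∀ (dp : List (List Int)) (pairs : List (Int × Int)) (mask : Int) (idx : Int) (n : Int), Dom_slv dp pairs mask idx n → Pre_slv dp pairs mask idx n → Spec_slv dp pairs mask idx n (slv dp pairs mask idx n)

-- ===== LEMMAS AND PROOFS =====

-- the common pure recursion both ports compute (it reads only the ORIGINAL dp)
def slvF (dp : List (List Int)) (pairs : List (Int × Int)) (n : Int) : Nat → Int → Int → Int
  | 0, _, _ => 0
  | fuel+1, mask, idx =>
    if mask = 0 then 0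
    else if idx ≠ -1 ∧ get2 dp idx mask ≠ -1 then get2 dp idx mask
    else
      let fa : Int := if idx ≠ -1 then (pget pairs idx).1 else -1
      let fb : Int := if idx ≠ -1 then (pget pairs idx).2 else -1
      (PySem.List.pyRange 0 n 1).foldl (fun mx i =>
        if PySem.Int.band mask (pybit i) ≠ 0 then
          if idx = -1 ∨ (pget pairs i).1 = fa ∨ (pget pairs i).2 = fb then
            max mx (1 + slvF dp pairs n fuel (PySem.Int.bxor mask (pybit i)) i)
          else mx
        else mx) 0

-- ---- bit facts ----
theorem xor_two_pow_lt (m k : Nat) (h : m.testBit k = true) : m ^^^ 2^k < m := by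
  apply Nat.lt_of_testBit k
  · simp [Nat.testBit_xor, h]
  · exact h
  · intro j hj
    simp [Nat.testBit_xor, Nat.testBit_two_pow_of_ne (Nat.ne_of_lt hj)]

theorem shl_one_eq (k : Nat) : ((1:Int) <<< k) = ((2^k : Nat) : Int) := by
  show Int.ofNat 1 <<< k = _
  show Int.ofNat (1 <<< k) = _
  simp [Nat.shiftLeft_eq]

theorem band_pow_iff (mask i : Int) (h : 0 ≤ mask) :
    (PySem.Int.band mask (pybit i) ≠ 0) ↔ mask.toNat.testBit i.toNat = true := by
  obtain ⟨m, rfl⟩ := Int.eq_ofNat_of_zero_le h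
  rw [pybit, shl_one_eq, PySem.Int.band_natCast]
  cases hb : m.testBit i.toNat
  · simp [Nat.and_two_pow, hb]
  · simp [Nat.and_two_pow, hb]

theorem shr_band_iff (mask : Int) (k : Nat) (h : 0 ≤ mask) :
    (PySem.Int.band (pyshr mask k) 1 = 1) ↔ mask.toNat.testBit k = true := by
  obtain ⟨m, rfl⟩ := Int.eq_ofNat_of_zero_le h
  have h1 : pyshr (m:Int) k = ((m >>> k : Nat) : Int) := rfl
  have h2 : (1:Int) = ((1:Nat):Int) := rfl
  rw [h1, h2, PySem.Int.band_natCast]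
  have key : ((m >>> k) &&& 1 = 1) ↔ m.testBit k = true := by
    rw [Nat.testBit]
    cases h : (1 &&& (m >>> k)) != 0 <;> simp_all [Nat.and_comm]
  rw [Int.toNat_natCast]
  constructor
  · intro hx; exact key.mp (by exact_mod_cast hx)
  · intro hx; exact_mod_cast congrArg (fun x : Nat => (x : Int)) (key.mpr hx)

theorem bxor_pow_eq (mask i : Int) (h : 0 ≤ mask) :
    PySem.Int.bxor mask (pybit i) = ((mask.toNat ^^^ 2^i.toNat : Nat) : Int) := by
  obtain ⟨m, rfl⟩ := Int.eq_ofNat_of_zero_le h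
  rw [pybit, shl_one_eq, PySem.Int.bxor_natCast]
  simp

theorem bxor_lt (mask i : Int) (h : 0 ≤ mask) (hb : mask.toNat.testBit i.toNat = true) :
    0 ≤ PySem.Int.bxor mask (pybit i) ∧ PySem.Int.bxor mask (pybit i) < mask := by
  rw [bxor_pow_eq mask i h]
  have := xor_two_pow_lt mask.toNat i.toNat hb
  omega

-- ---- generic fold fact ----
-- ---- fuel stability of slvF ----
theorem slvF_stable (dp : List (List Int)) (pairs : List (Int × Int)) (n : Int) :
    ∀ (f1 f2 : Nat) (mask idx : Int), 0 ≤ mask → mask.toNat < f1 → mask.toNat < f2 →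
      slvF dp pairs n f1 mask idx = slvF dp pairs n f2 mask idx := by
  intro f1
  induction f1 with
  | zero => intro f2 mask idx _ h1 _; omega
  | succ a ih =>
    intro f2 mask idx hm h1 h2
    obtain ⟨b, rfl⟩ : ∃ b, f2 = b + 1 := ⟨f2 - 1, by omega⟩
    simp only [slvF]
    split
    · rfl
    · split
      · rfl
      · apply PySem.List.foldl_congr_mem
        intro acc x hx
        obtain ⟨hx0, hxn⟩ := PySem.List.mem_pyRange_one.mp hx
        by_cases hband : PySem.Int.band mask (pybit x) = 0
        · simp only [ne_eq, hband, not_true_eq_false, if_false]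
        · have htb := (band_pow_iff mask x hm).mp hband
          simp only [ne_eq, hband, not_false_eq_true, if_true]
          obtain ⟨hge, hlt⟩ := bxor_lt mask x hm htb
          have hih := ih b (PySem.Int.bxor mask (pybit x)) x hge (by omega) (by omega)
          rw [hih]

-- ---- indexing lemmas ----
theorem get2_nonneg (xss : List (List Int)) (i j : Int) (hi : 0 ≤ i) (hj : 0 ≤ j) :
    get2 xss i j = (xss.getD i.toNat []).getD j.toNat (-1) := by
  rw [get2, PySem.List.pyGetD_of_nonneg _ _ hi, PySem.List.pyGetD_of_nonneg _ _ hj]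

theorem put2_eq (xss : List (List Int)) (i j v : Int) (hi : 0 ≤ i) (hj : 0 ≤ j) :
    put2 xss i j v = xss.set i.toNat ((xss.getD i.toNat []).set j.toNat v) := by
  rw [put2, PySem.List.pyGetD_of_nonneg _ _ hi, PySem.List.pySetD_of_nonneg _ _ hj,
    PySem.List.pySetD_of_nonneg _ _ hi]

theorem getD_set (l : List (List Int)) (a : Nat) (r : List Int) (k : Nat) :
    (l.set a r).getD k [] = if a = k ∧ a < l.length then r else l.getD k [] := by
  rw [List.getD_eq_getElem?_getD, List.getD_eq_getElem?_getD, List.getElem?_set]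
  by_cases h1 : a = k
  · subst h1
    by_cases h2 : a < l.length
    · simp [h2]
    · rw [List.getElem?_eq_none (show l.length ≤ a by omega)]
      simp [h2]
  · simp [h1]

theorem getDI_set (l : List Int) (a : Nat) (r : Int) (k : Nat) :
    (l.set a r).getD k (-1) = if a = k ∧ a < l.length then r else l.getD k (-1) := by
  rw [List.getD_eq_getElem?_getD, List.getD_eq_getElem?_getD, List.getElem?_set]
  by_cases h1 : a = k
  · subst h1
    by_cases h2 : a < l.length
    · simp [h2]
    · rw [List.getElem?_eq_none (show l.length ≤ a by omega)]
      simp [h2]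
  · simp [h1]

theorem length_put2 (xss : List (List Int)) (i j v : Int) (hi : 0 ≤ i) (hj : 0 ≤ j) :
    (put2 xss i j v).length = xss.length := by
  rw [put2_eq _ _ _ _ hi hj, List.length_set]

theorem row_put2 (xss : List (List Int)) (i j v : Int) (hi : 0 ≤ i) (hj : 0 ≤ j) (k : Nat) :
    ((put2 xss i j v).getD k []).length = (xss.getD k []).length := by
  rw [put2_eq _ _ _ _ hi hj, getD_set]
  split
  · next h => rw [← h.1, List.length_set]
  · rfl

theorem get2_put2 (xss : List (List Int)) (i j v i' j' : Int)
    (hi : 0 ≤ i) (hj : 0 ≤ j) (hi' : 0 ≤ i') (hj' : 0 ≤ j')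
    (hil : i.toNat < xss.length) (hjl : j.toNat < (xss.getD i.toNat []).length) :
    get2 (put2 xss i j v) i' j' = if i' = i ∧ j' = j then v else get2 xss i' j' := by
  rw [get2_nonneg _ _ _ hi' hj', get2_nonneg _ _ _ hi' hj', put2_eq _ _ _ _ hi hj, getD_set]
  by_cases h1 : i' = i
  · have h1' : i.toNat = i'.toNat := by omega
    rw [if_pos ⟨h1', by omega⟩, getDI_set]
    by_cases h2 : j' = j
    · rw [if_pos ⟨by omega, by omega⟩, if_pos ⟨h1, h2⟩]
    · rw [if_neg (by omega), if_neg (by simp [h1, h2]), h1]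
  · rw [if_neg (by omega), if_neg (by simp [h1])]

-- ---- the invariant ----
def shapeEq (dp0 dp : List (List Int)) : Prop :=
  dp.length = dp0.length ∧ ∀ k : Nat, (dp.getD k []).length = (dp0.getD k []).length

def goodDp (dp0 : List (List Int)) (pairs : List (Int × Int)) (n mask0 : Int)
    (dp : List (List Int)) : Prop :=
  shapeEq dp0 dp ∧ ∀ i m : Int, 0 ≤ i → i < n → 0 < m → m ≤ mask0 →
    get2 dp i m = get2 dp0 i m ∨
    (get2 dp0 i m = -1 ∧ get2 dp i m = slvF dp0 pairs n (m.toNat + 1) m i)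

theorem rows_big (dp0 : List (List Int)) (n mask0 : Int)
    (hrows : ∀ row ∈ dp0.take n.toNat, mask0 < (row.length : Int)) (k : Nat)
    (hk : k < n.toNat) (hk2 : k < dp0.length) : mask0 < ((dp0.getD k []).length : Int) := by
  have hlt : k < (dp0.take n.toNat).length := by simp [List.length_take]; omega
  have heq : (dp0.take n.toNat)[k] = dp0[k] := List.getElem_take
  have hmem : dp0[k] ∈ dp0.take n.toNat := by
    rw [← heq]; exact List.getElem_mem hlt
  have := hrows _ hmem
  rw [List.getD_eq_getElem?_getD, List.getElem?_eq_getElem hk2]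
  exact this

theorem good_after_put (dp0 : List (List Int)) (pairs : List (Int × Int)) (n mask0 : Int)
    (hdplen : n ≤ (dp0.length : Int))
    (hrows : ∀ row ∈ dp0.take n.toNat, mask0 < (row.length : Int))
    (idx mask : Int) (hio : 0 ≤ idx) (hin : idx < n) (hmpos : 0 < mask) (hmle : mask ≤ mask0)
    (st2 : List (List Int)) (v : Int) (hg : goodDp dp0 pairs n mask0 st2)
    (h0 : get2 dp0 idx mask = -1) (hv : v = slvF dp0 pairs n (mask.toNat + 1) mask idx) :
    goodDp dp0 pairs n mask0 (put2 st2 idx mask v) := by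
  have hmn : (0:Int) ≤ mask := by omega
  have hil : idx.toNat < st2.length := by rw [hg.1.1]; omega
  have hrow0 : mask0 < ((dp0.getD idx.toNat []).length : Int) :=
    rows_big dp0 n mask0 hrows idx.toNat (by omega) (by omega)
  have hjl : mask.toNat < (st2.getD idx.toNat []).length := by
    have := hg.1.2 idx.toNat; omega
  refine ⟨⟨?_, ?_⟩, ?_⟩
  · rw [length_put2 _ _ _ _ hio hmn]; exact hg.1.1
  · intro k; rw [row_put2 _ _ _ _ hio hmn]; exact hg.1.2 k
  · intro i m hi0 hin2 hm2 hmle2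
    rw [get2_put2 st2 idx mask v i m hio hmn hi0 (by omega) hil hjl]
    split_ifs with hc
    · right
      rw [hc.1, hc.2]
      exact ⟨h0, hv⟩
    · exact hg.2 i m hi0 hin2 hm2 hmle2

theorem slvGo_eq (dp0 : List (List Int)) (pairs : List (Int × Int)) (n mask0 : Int)
    (hdplen : n ≤ (dp0.length : Int))
    (hrows : ∀ row ∈ dp0.take n.toNat, mask0 < (row.length : Int)) :
    ∀ (fuel : Nat) (dp : List (List Int)) (mask idx : Int),
      goodDp dp0 pairs n mask0 dp → 0 ≤ mask → mask ≤ mask0 →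
      (idx = -1 ∨ (0 ≤ idx ∧ idx < n)) → mask.toNat < fuel →
      (slvGo pairs n fuel dp mask idx).1 = slvF dp0 pairs n (mask.toNat + 1) mask idx ∧
      goodDp dp0 pairs n mask0 (slvGo pairs n fuel dp mask idx).2 := by
  intro fuel
  induction fuel with
  | zero => intro dp mask idx _ _ _ _ h; omega
  | succ f ih =>
    intro dp mask idx hgood hm hmle hidx hfuel
    by_cases hm0 : mask = 0
    · subst hm0
      constructor
      · simp [slvGo, slvF]
      · simpa [slvGo] using hgood
    · by_cases hmemo : idx ≠ -1 ∧ get2 dp idx mask ≠ -1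
      · obtain ⟨hio, hin⟩ : 0 ≤ idx ∧ idx < n := by
          rcases hidx with h | h
          · exact absurd h hmemo.1
          · exact h
        have hG := hgood.2 idx mask hio hin (by omega) hmle
        have hgo : slvGo pairs n (f+1) dp mask idx = (get2 dp idx mask, dp) := by
          simp only [slvGo]
          rw [if_neg hm0, if_pos hmemo]
        rw [hgo]
        refine ⟨?_, hgood⟩
        rcases hG with heq | ⟨h0, hv⟩
        · have : get2 dp0 idx mask ≠ -1 := heq ▸ hmemo.2
          simp only [slvF]
          rw [if_neg hm0, if_pos ⟨hmemo.1, this⟩, heq]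
        · exact hv
      · -- compute branch
        have hFmemo : ¬(idx ≠ -1 ∧ get2 dp0 idx mask ≠ -1) := by
          rcases hidx with h | h
          · simp [h]
          · push_neg at hmemo
            rcases Classical.em (idx = -1) with h1 | h1
            · simp [h1]
            · have hdm := hmemo h1
              have hG := hgood.2 idx mask h.1 h.2 (by omega) hmle
              rcases hG with heq | ⟨h0, _⟩
              · intro hc; exact hc.2 (heq ▸ hdm)
              · intro hc; exact hc.2 h0
        have key : ∀ (l : List Int), (∀ x ∈ l, 0 ≤ x ∧ x < n) →
            ∀ (mx : Int) (dpc : List (List Int)), goodDp dp0 pairs n mask0 dpc →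
            (List.foldl (fun (s : Int × List (List Int)) i =>
                if PySem.Int.band mask (pybit i) ≠ 0 then
                  if idx = -1 ∨ (pget pairs i).1 = (if idx ≠ -1 then (pget pairs idx).1 else -1) ∨
                      (pget pairs i).2 = (if idx ≠ -1 then (pget pairs idx).2 else -1) then
                    (max s.1 (1 + (slvGo pairs n f s.2 (PySem.Int.bxor mask (pybit i)) i).1),
                     (slvGo pairs n f s.2 (PySem.Int.bxor mask (pybit i)) i).2)
                  else s
                else s) (mx, dpc) l).1
              = List.foldl (fun mx i =>
                if PySem.Int.band mask (pybit i) ≠ 0 then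
                  if idx = -1 ∨ (pget pairs i).1 = (if idx ≠ -1 then (pget pairs idx).1 else -1) ∨
                      (pget pairs i).2 = (if idx ≠ -1 then (pget pairs idx).2 else -1) then
                    max mx (1 + slvF dp0 pairs n mask.toNat (PySem.Int.bxor mask (pybit i)) i)
                  else mx
                else mx) mx l
             ∧ goodDp dp0 pairs n mask0 (List.foldl (fun (s : Int × List (List Int)) i =>
                if PySem.Int.band mask (pybit i) ≠ 0 then
                  if idx = -1 ∨ (pget pairs i).1 = (if idx ≠ -1 then (pget pairs idx).1 else -1) ∨
                      (pget pairs i).2 = (if idx ≠ -1 then (pget pairs idx).2 else -1) then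
                    (max s.1 (1 + (slvGo pairs n f s.2 (PySem.Int.bxor mask (pybit i)) i).1),
                     (slvGo pairs n f s.2 (PySem.Int.bxor mask (pybit i)) i).2)
                  else s
                else s) (mx, dpc) l).2 := by
          intro l
          induction l with
          | nil => intro _ mx dpc hg; exact ⟨rfl, hg⟩
          | cons x t iht =>
            intro hmem mx dpc hg
            obtain ⟨hx0, hxn⟩ := hmem x List.mem_cons_self
            simp only [List.foldl_cons]
            by_cases hband : PySem.Int.band mask (pybit x) = 0
            · simp only [ne_eq, hband, not_true_eq_false, if_false]
              exact iht (fun y hy => hmem y (List.mem_cons_of_mem _ hy)) mx dpc hg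
            · have htb := (band_pow_iff mask x hm).mp hband
              obtain ⟨hge, hlt⟩ := bxor_lt mask x hm htb
              simp only [ne_eq, hband, not_false_eq_true, if_true]
              by_cases hcomp : idx = -1 ∨ (pget pairs x).1 = (if idx ≠ -1 then (pget pairs idx).1 else -1) ∨
                  (pget pairs x).2 = (if idx ≠ -1 then (pget pairs idx).2 else -1)
              · rw [if_pos hcomp, if_pos hcomp]
                have hrec := ih dpc (PySem.Int.bxor mask (pybit x)) x hg hge (by omega)
                  (Or.inr ⟨hx0, hxn⟩) (by omega)
                have hst := slvF_stable dp0 pairs n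
                  ((PySem.Int.bxor mask (pybit x)).toNat + 1) mask.toNat
                  (PySem.Int.bxor mask (pybit x)) x hge (by omega) (by omega)
                rw [hrec.1, hst] at *
                exact iht (fun y hy => hmem y (List.mem_cons_of_mem _ hy)) _ _ hrec.2
              · rw [if_neg hcomp, if_neg hcomp]
                exact iht (fun y hy => hmem y (List.mem_cons_of_mem _ hy)) mx dpc hg
        have hmem0 : ∀ x ∈ PySem.List.pyRange 0 n 1, 0 ≤ x ∧ x < n := by
          intro x hx; exact PySem.List.mem_pyRange_one.mp hx
        have hmain := key (PySem.List.pyRange 0 n 1) hmem0 0 dp hgood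
        constructor
        · simp only [slvGo, slvF]
          rw [if_neg hm0, if_neg hmemo, if_neg hm0, if_neg hFmemo]
          by_cases hI : idx = -1
          · rw [if_pos hI]; exact hmain.1
          · rw [if_neg hI]; exact hmain.1
        · simp only [slvGo]
          rw [if_neg hm0, if_neg hmemo]
          by_cases hI : idx = -1
          · rw [if_pos hI]; exact hmain.2
          · rw [if_neg hI]
            obtain ⟨hio, hin⟩ : 0 ≤ idx ∧ idx < n := by
              rcases hidx with h | h
              · exact absurd h hI
              · exact h
            have h0 : get2 dp0 idx mask = -1 := by
              by_contra hc; exact hFmemo ⟨hI, hc⟩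
            have hFv : slvF dp0 pairs n (mask.toNat + 1) mask idx
                = List.foldl (fun mx i =>
                    if PySem.Int.band mask (pybit i) ≠ 0 then
                      if idx = -1 ∨ (pget pairs i).1 = (if idx ≠ -1 then (pget pairs idx).1 else -1) ∨
                          (pget pairs i).2 = (if idx ≠ -1 then (pget pairs idx).2 else -1) then
                        max mx (1 + slvF dp0 pairs n mask.toNat (PySem.Int.bxor mask (pybit i)) i)
                      else mx
                    else mx) 0 (PySem.List.pyRange 0 n 1) := by
              simp only [slvF]
              rw [if_neg hm0, if_neg hFmemo]
            exact good_after_put dp0 pairs n mask0 hdplen hrows idx mask hio hin (by omega) hmle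
              _ _ hmain.2 h0 (hmain.1.trans hFv.symm)

def rowP (dp : List (List Int)) (pairs : List (Int × Int)) (n m : Int) : List Int :=
  (PySem.List.pyRange 0 n 1).map (fun i => slvF dp pairs n (m.toNat + 1) m i)

theorem rowP_zero (dp : List (List Int)) (pairs : List (Int × Int)) (n : Int) :
    rowP dp pairs n 0 = List.replicate n.toNat 0 := by
  rw [rowP]
  have : (fun i => slvF dp pairs n ((0:Int).toNat + 1) 0 i) = Function.const Int (0:Int) := by
    funext i; simp [slvF]
  rw [this, List.map_const, PySem.List.length_pyRange_one]
  norm_num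

theorem row_step (dp : List (List Int)) (pairs : List (Int × Int)) (n : Int) (M : Int)
    (hM : 0 < M) (g : List (List Int))
    (hg : ∀ m' : Int, 0 ≤ m' → m' < M → PySem.List.pyGetD g m' [] = rowP dp pairs n m') :
    (PySem.List.pyRange 0 n 1).foldl (fun row i =>
      if get2 dp i M ≠ -1 then row ++ [get2 dp i M]
      else
        row ++ [(PySem.List.pyRange 0 n 1).foldl (fun best j =>
          if PySem.Int.band (pyshr M j.toNat) 1 = 1 ∧
              ((pget pairs j).1 = (pget pairs i).1 ∨ (pget pairs j).2 = (pget pairs i).2) then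
            (if 1 + get2 g (PySem.Int.bxor M (pybit j)) j > best
             then 1 + get2 g (PySem.Int.bxor M (pybit j)) j else best)
          else best) 0]) []
    = rowP dp pairs n M := by
  have hbody : (fun (row : List Int) i =>
      if get2 dp i M ≠ -1 then row ++ [get2 dp i M]
      else
        row ++ [(PySem.List.pyRange 0 n 1).foldl (fun best j =>
          if PySem.Int.band (pyshr M j.toNat) 1 = 1 ∧
              ((pget pairs j).1 = (pget pairs i).1 ∨ (pget pairs j).2 = (pget pairs i).2) then
            (if 1 + get2 g (PySem.Int.bxor M (pybit j)) j > best
             then 1 + get2 g (PySem.Int.bxor M (pybit j)) j else best)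
          else best) 0])
      = fun (row : List Int) i => row ++ [if get2 dp i M ≠ -1 then get2 dp i M
      else (PySem.List.pyRange 0 n 1).foldl (fun best j =>
          if PySem.Int.band (pyshr M j.toNat) 1 = 1 ∧
              ((pget pairs j).1 = (pget pairs i).1 ∨ (pget pairs j).2 = (pget pairs i).2) then
            (if 1 + get2 g (PySem.Int.bxor M (pybit j)) j > best
             then 1 + get2 g (PySem.Int.bxor M (pybit j)) j else best)
          else best) 0] := by
    funext row i; split_ifs <;> rfl
  rw [hbody, PySem.List.foldl_append_singleton_eq_map, List.nil_append, rowP]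
  apply List.map_congr_left
  intro i hi
  obtain ⟨hi0, hin⟩ := PySem.List.mem_pyRange_one.mp hi
  have hine : i ≠ -1 := by omega
  have hMn : (0:Int) ≤ M := by omega
  by_cases hd : get2 dp i M ≠ -1
  · rw [if_pos hd]
    simp only [slvF]
    rw [if_neg (by omega : ¬ M = 0), if_pos ⟨hine, hd⟩]
  · rw [if_neg hd]
    simp only [slvF]
    rw [if_neg (by omega : ¬ M = 0), if_neg (by intro hc; exact hd hc.2)]
    rw [if_pos hine, if_pos hine]
    apply Eq.symm
    apply PySem.List.foldl_congr_mem
    intro acc j hj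
    obtain ⟨hj0, hjn⟩ := PySem.List.mem_pyRange_one.mp hj
    by_cases hbit : PySem.Int.band M (pybit j) = 0
    · have hbit2 : ¬ (PySem.Int.band (pyshr M j.toNat) 1 = 1) := by
        rw [shr_band_iff M j.toNat hMn]
        intro hc
        exact ((band_pow_iff M j hMn).mpr hc) hbit
      rw [if_neg (not_not_intro hbit), if_neg (by intro hc; exact hbit2 hc.1)]
    · have htb := (band_pow_iff M j hMn).mp hbit
      obtain ⟨hge, hlt⟩ := bxor_lt M j hMn htb
      have hbit2 : PySem.Int.band (pyshr M j.toNat) 1 = 1 := (shr_band_iff M j.toNat hMn).mpr htb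
      rw [if_pos hbit]
      by_cases hcp : (pget pairs j).1 = (pget pairs i).1 ∨ (pget pairs j).2 = (pget pairs i).2
      · rw [if_pos (Or.inr hcp), if_pos ⟨hbit2, hcp⟩]
        have hgv : get2 g (PySem.Int.bxor M (pybit j)) j
            = slvF dp pairs n M.toNat (PySem.Int.bxor M (pybit j)) j := by
          rw [get2, hg _ hge hlt, rowP,
            PySem.List.pyGetD_map_pyRange_of_nonneg _ n j (-1) hj0 hjn]
          exact slvF_stable dp pairs n _ M.toNat _ j hge (by omega) (by omega)
        rw [hgv]
        omega
      · have hneg1 : ¬ (i = -1 ∨ (pget pairs j).1 = (pget pairs i).1 ∨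
            (pget pairs j).2 = (pget pairs i).2) := by
          rintro (hc | hc)
          · exact hine hc
          · exact hcp hc
        have hneg2 : ¬ (PySem.Int.band (pyshr M j.toNat) 1 = 1 ∧
            ((pget pairs j).1 = (pget pairs i).1 ∨ (pget pairs j).2 = (pget pairs i).2)) :=
          fun hc => hcp hc.2
        rw [if_neg hneg1, if_neg hneg2]

theorem slvTab_eq (dp : List (List Int)) (pairs : List (Int × Int)) (n : Int) :
    ∀ K : Nat, slvTab dp pairs n (K:Int)
      = (PySem.List.pyRange 0 ((K:Int)+1) 1).map (rowP dp pairs n) := by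
  intro K
  induction K with
  | zero =>
    have h1 : PySem.List.pyRange 1 ((0:Int)+1) 1 = [] := PySem.List.pyRange_one_eq_nil (by norm_num)
    have h2 : PySem.List.pyRange 0 ((0:Int)+1) 1 = [0] := by
      rw [PySem.List.pyRange_one_cons (by norm_num)]
      norm_num [PySem.List.pyRange_one_eq_nil]
    simp only [Nat.cast_zero, slvTab, h1, h2, List.foldl_nil, List.map]
    rw [rowP_zero]
  | succ K ihK =>
    have hcast : ((K+1 : Nat) : Int) = (K:Int) + 1 := by push_cast; ring
    rw [hcast, slvTab, PySem.List.pyRange_one_succ_right (by omega), List.foldl_append]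
    have hpre : (PySem.List.pyRange 1 ((K:Int) + 1) 1).foldl _ [List.replicate n.toNat 0]
        = slvTab dp pairs n (K:Int) := rfl
    rw [hpre, ihK]
    simp only [List.foldl_cons, List.foldl_nil]
    rw [PySem.List.pyRange_one_succ_right (a := 0) (b := (K:Int)+1) (by omega), List.map_append]
    congr 1
    have hg : ∀ m' : Int, 0 ≤ m' → m' < (K:Int)+1 →
        PySem.List.pyGetD ((PySem.List.pyRange 0 ((K:Int)+1) 1).map (rowP dp pairs n)) m' []
          = rowP dp pairs n m' := by
      intro m' h1 h2
      exact PySem.List.pyGetD_map_pyRange_of_nonneg _ _ _ _ h1 h2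
    rw [row_step dp pairs n ((K:Int)+1) (by omega) _ hg]
    simp

theorem slv_alt_eq (dp : List (List Int)) (pairs : List (Int × Int)) (mask idx n : Int)
    (hm0 : 0 < mask) (hidx : idx = -1 ∨ (0 ≤ idx ∧ idx < n)) :
    slv_alt dp pairs mask idx n = slvF dp pairs n (mask.toNat + 1) mask idx := by
  have hmn : (0:Int) ≤ mask := le_of_lt hm0
  obtain ⟨K, hK⟩ : ∃ K : Nat, (K:Int) = mask := ⟨mask.toNat, by omega⟩
  have htab : slvTab dp pairs n mask = (PySem.List.pyRange 0 (mask+1) 1).map (rowP dp pairs n) := by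
    rw [← hK]; exact slvTab_eq dp pairs n K
  rw [slv_alt, if_neg (by omega : ¬ mask = 0)]
  by_cases hmemo : idx ≠ -1 ∧ get2 dp idx mask ≠ -1
  case pos =>
    rw [if_pos hmemo]
    simp only [slvF]
    rw [if_neg (by omega : ¬ mask = 0), if_pos hmemo]
  rw [if_neg hmemo]
  simp only [htab]
  have hrow : ∀ m' : Int, 0 ≤ m' → m' ≤ mask →
      PySem.List.pyGetD ((PySem.List.pyRange 0 (mask+1) 1).map (rowP dp pairs n)) m' []
        = rowP dp pairs n m' := by
    intro m' h1 h2
    exact PySem.List.pyGetD_map_pyRange_of_nonneg _ _ _ _ h1 (by omega)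
  by_cases hI : idx = -1
  · rw [if_neg (not_not_intro hI)]
    subst hI
    simp only [slvF]
    rw [if_neg (by omega : ¬ mask = 0), if_neg (by simp)]
    rw [if_neg (by simp : ¬ (-1:Int) ≠ -1), if_neg (by simp : ¬ (-1:Int) ≠ -1)]
    apply Eq.symm
    apply PySem.List.foldl_congr_mem
    intro acc j hj
    obtain ⟨hj0, hjn⟩ := PySem.List.mem_pyRange_one.mp hj
    by_cases hbit : PySem.Int.band mask (pybit j) = 0
    · have hbit2 : ¬ (PySem.Int.band (pyshr mask j.toNat) 1 = 1) := by
        rw [shr_band_iff mask j.toNat hmn]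
        intro hc
        exact ((band_pow_iff mask j hmn).mpr hc) hbit
      rw [if_neg (not_not_intro hbit), if_neg hbit2]
    · have htb := (band_pow_iff mask j hmn).mp hbit
      obtain ⟨hge, hlt⟩ := bxor_lt mask j hmn htb
      have hbit2 : PySem.Int.band (pyshr mask j.toNat) 1 = 1 := (shr_band_iff mask j.toNat hmn).mpr htb
      rw [if_pos hbit, if_pos (Or.inl trivial), if_pos hbit2]
      have hgv : get2 ((PySem.List.pyRange 0 (mask+1) 1).map (rowP dp pairs n))
          (PySem.Int.bxor mask (pybit j)) j
          = slvF dp pairs n mask.toNat (PySem.Int.bxor mask (pybit j)) j := by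
        rw [get2, hrow _ hge (by omega), rowP,
          PySem.List.pyGetD_map_pyRange_of_nonneg _ n j (-1) hj0 hjn]
        exact slvF_stable dp pairs n _ mask.toNat _ j hge (by omega) (by omega)
      rw [hgv]
      omega
  · rw [if_pos hI]
    obtain ⟨hi0, hin⟩ : 0 ≤ idx ∧ idx < n := by
      rcases hidx with h | h
      · exact absurd h hI
      · exact h
    rw [get2, hrow mask hmn le_rfl, rowP,
      PySem.List.pyGetD_map_pyRange_of_nonneg _ n idx (-1) hi0 hin]

theorem slv_eq_alt (dp : List (List Int)) (pairs : List (Int × Int)) (mask idx n : Int)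
    (hpre : mask = 0 ∨
      (idx ≠ -1 ∧ PySem.Raise.InRange dp.length idx ∧
       PySem.Raise.InRange (PySem.List.pyGetD dp idx []).length mask ∧ get2 dp idx mask ≠ -1) ∨
      (mask < 0 ∧ idx = -1 ∧ n ≤ 0) ∨
      (0 ≤ n ∧ n ≤ (pairs.length : Int) ∧ n ≤ (dp.length : Int) ∧ 0 < mask ∧
       (idx = -1 ∨ (0 ≤ idx ∧ idx < n)) ∧
       ∀ row ∈ dp.take n.toNat, mask < (row.length : Int))) :
    slv dp pairs mask idx n = slv_alt dp pairs mask idx n := by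
  rcases hpre with hm0 | ⟨hi1, _, _, hv⟩ | ⟨hmneg, hI, hn0⟩ | ⟨hn, hplen, hdlen, hmpos, hidx, hrows⟩
  · subst hm0
    simp [slv, slvGo, slv_alt]
  · -- the queried state is memoized: both return dp[idx][mask]
    by_cases hm0 : mask = 0
    · subst hm0; simp [slv, slvGo, slv_alt]
    · have hgo : slv dp pairs mask idx n = get2 dp idx mask := by
        have : mask.toNat + 1 = mask.toNat + 1 := rfl
        rw [slv]
        simp only [slvGo]
        rw [if_neg hm0, if_pos ⟨hi1, hv⟩]
      rw [hgo, slv_alt, if_neg hm0, if_pos ⟨hi1, hv⟩]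
  · -- mask < 0, idx = -1, n ≤ 0: both sides return 0
    subst hI
    have h1 : PySem.List.pyRange 0 n 1 = [] := PySem.List.pyRange_one_eq_nil (by omega)
    have h2 : PySem.List.pyRange 1 (mask + 1) 1 = [] := PySem.List.pyRange_one_eq_nil (by omega)
    have hgo : slv dp pairs mask (-1) n = 0 := by
      rw [slv]
      simp only [slvGo]
      rw [if_neg (by omega : ¬ mask = 0), if_neg (by simp), h1]
      simp
    rw [hgo, slv_alt, if_neg (by omega : ¬ mask = 0), if_neg (by simp), slvTab, h2, h1]
    simp
  · have hgood : goodDp dp pairs n mask dp :=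
      ⟨⟨rfl, fun k => rfl⟩, fun i m _ _ _ _ => Or.inl rfl⟩
    have hA := slvGo_eq dp pairs n mask hdlen hrows (mask.toNat + 1) dp mask idx hgood
      (le_of_lt hmpos) le_rfl hidx (by omega)
    rw [slv, hA.1, ← slv_alt_eq dp pairs mask idx n hmpos hidx]

-- ===== VERDICT (by name: the statement is the Claim_ definition above) =====
theorem slv_spec : Claim_equal_slv := by
  intro dp pairs mask idx n _ hpre
  unfold Pre_slv at hpre
  unfold Spec_slv
  exact slv_eq_alt dp pairs mask idx n hpre
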